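-- pv_equiv track=rewrite | github.com/together2329/brian_hw | brian_coder/procedural_memory.py | _is_related_task_type
-- ===== SOURCE A (Python) =====
-- def _is_related_task_type(type1: str, type2: str) -> bool:
--     """Check if two task types are related."""
--     related_groups = [
--         {"compile_verilog", "compile_code"},
--         {"test_python", "run_python", "python_task"},
--         {"debug_task", "fix_task"},
--         {"read_task", "analyze_task"},
--         {"write_code", "write_task"},
--     ]
--
--     for group in related_groups:
--         if type1 in group and type2 in group:
--             return True
--
--     return False
-- ===== SOURCE B (Python) =====
-- _RELATED_GROUPS = [
--     ("compile_verilog", "compile_code"),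
--     ("test_python", "run_python", "python_task"),
--     ("debug_task", "fix_task"),
--     ("read_task", "analyze_task"),
--     ("write_code", "write_task"),
-- ]
-- _GROUP_OF = {t: i for i, grp in enumerate(_RELATED_GROUPS) for t in grp}
--
--
-- def _is_related_task_type(type1: str, type2: str) -> bool:
--     """Check if two task types are related."""
--     g1 = _GROUP_OF.get(type1)
--     return g1 is not None and g1 == _GROUP_OF.get(type2)
-- ===== Notes on version B (the rewrite author's own statement) =====
-- stated objective: idiomatic
-- what changed: Replaces the per-call scan over the list of related groups with a module-level dict mapping each task type to its group index, so the function body is just two dict lookups and an equality test.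
import Mathlib
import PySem

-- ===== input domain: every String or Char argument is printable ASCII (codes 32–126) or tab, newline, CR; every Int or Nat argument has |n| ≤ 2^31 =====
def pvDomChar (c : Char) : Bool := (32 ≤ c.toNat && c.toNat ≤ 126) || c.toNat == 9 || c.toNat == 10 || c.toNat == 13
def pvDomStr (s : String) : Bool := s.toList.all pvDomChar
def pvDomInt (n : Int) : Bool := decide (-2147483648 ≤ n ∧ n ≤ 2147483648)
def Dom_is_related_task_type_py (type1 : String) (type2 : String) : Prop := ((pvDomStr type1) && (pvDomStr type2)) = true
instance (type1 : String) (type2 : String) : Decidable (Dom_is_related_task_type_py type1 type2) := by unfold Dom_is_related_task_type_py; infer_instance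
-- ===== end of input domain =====

-- B replaces A's per-call scan over the groups with a precomputed task-type → group-id dictionary and two lookups (idiomatic/alternative, same observable result).

-- ===== PORT A =====
def pvGroups : List (PySem.Set String) :=
  [PySem.Set.ofList ["compile_verilog", "compile_code"],
   PySem.Set.ofList ["test_python", "run_python", "python_task"],
   PySem.Set.ofList ["debug_task", "fix_task"],
   PySem.Set.ofList ["read_task", "analyze_task"],
   PySem.Set.ofList ["write_code", "write_task"]]

-- the 'for group in related_groups' loop, returning True on the first group containing both
def pvLoopA (type1 type2 : String) : List (PySem.Set String) → Bool
  | [] => false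
  | g :: rest =>
      if PySem.Set.contains g type1 && PySem.Set.contains g type2 then true
      else pvLoopA type1 type2 rest

def is_related_task_type_py (type1 : String) (type2 : String) : Bool :=
  pvLoopA type1 type2 pvGroups

-- ===== PORT B =====
-- the dict comprehension {t: i for i, grp in enumerate(_RELATED_GROUPS) for t in grp}
def pvGroupOf : PySem.Dict String Int :=
  PySem.Dict.ofList [("compile_verilog", 0), ("compile_code", 0),
    ("test_python", 1), ("run_python", 1), ("python_task", 1),
    ("debug_task", 2), ("fix_task", 2),
    ("read_task", 3), ("analyze_task", 3),
    ("write_code", 4), ("write_task", 4)]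

def is_related_task_type_py_alt (type1 : String) (type2 : String) : Bool :=
  match PySem.Dict.get? pvGroupOf type1 with
  | none => false                                   -- g1 is None → False
  | some g1 => some g1 == PySem.Dict.get? pvGroupOf type2   -- g1 == _GROUP_OF.get(type2)

-- ===== PRECONDITION & SPEC =====
def Spec_is_related_task_type_py (type1 : String) (type2 : String) (out : Bool) : Prop := out = is_related_task_type_py_alt type1 type2
instance (type1 : String) (type2 : String) (out : Bool) : Decidable (Spec_is_related_task_type_py type1 type2 out) := by unfold Spec_is_related_task_type_py; infer_instance

-- ===== CLAIM (what is proved, stated in full; the proofs are below) =====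
def Claim_equal_is_related_task_type_py : Prop := ∀ (type1 : String) (type2 : String), Dom_is_related_task_type_py type1 type2 → Spec_is_related_task_type_py type1 type2 (is_related_task_type_py type1 type2)

-- ===== LEMMAS AND PROOFS =====
theorem pvGroupOf_mk : pvGroupOf = PySem.Dict.mk [("compile_verilog", 0), ("compile_code", 0),
    ("test_python", 1), ("run_python", 1), ("python_task", 1),
    ("debug_task", 2), ("fix_task", 2),
    ("read_task", 3), ("analyze_task", 3),
    ("write_code", 4), ("write_task", 4)] := by decide

-- closed-form of the dict lookup, used to case on type2 in the main proof
def pvGAux (t : String) : Option Int :=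
  if t = "compile_verilog" then some 0 else if t = "compile_code" then some 0
  else if t = "test_python" then some 1 else if t = "run_python" then some 1
  else if t = "python_task" then some 1 else if t = "debug_task" then some 2
  else if t = "fix_task" then some 2 else if t = "read_task" then some 3
  else if t = "analyze_task" then some 3 else if t = "write_code" then some 4
  else if t = "write_task" then some 4 else none
theorem pvGval (t : String) : pvGroupOf.get? t = pvGAux t := by
  by_cases h0 : t = "compile_verilog"
  · subst h0; decide
  by_cases h1 : t = "compile_code"
  · subst h1; decide
  by_cases h2 : t = "test_python"
  · subst h2; decide
  by_cases h3 : t = "run_python"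
  · subst h3; decide
  by_cases h4 : t = "python_task"
  · subst h4; decide
  by_cases h5 : t = "debug_task"
  · subst h5; decide
  by_cases h6 : t = "fix_task"
  · subst h6; decide
  by_cases h7 : t = "read_task"
  · subst h7; decide
  by_cases h8 : t = "analyze_task"
  · subst h8; decide
  by_cases h9 : t = "write_code"
  · subst h9; decide
  by_cases h10 : t = "write_task"
  · subst h10; decide
  simp only [pvGroupOf_mk, pvGAux, PySem.Dict.get?_mk_cons]
  rw [if_neg (fun h => h0 (eq_of_beq h).symm), if_neg (fun h => h1 (eq_of_beq h).symm), if_neg (fun h => h2 (eq_of_beq h).symm), if_neg (fun h => h3 (eq_of_beq h).symm), if_neg (fun h => h4 (eq_of_beq h).symm), if_neg (fun h => h5 (eq_of_beq h).symm), if_neg (fun h => h6 (eq_of_beq h).symm), if_neg (fun h => h7 (eq_of_beq h).symm), if_neg (fun h => h8 (eq_of_beq h).symm), if_neg (fun h => h9 (eq_of_beq h).symm), if_neg (fun h => h10 (eq_of_beq h).symm), if_neg h0, if_neg h1, if_neg h2, if_neg h3, if_neg h4, if_neg h5, if_neg h6, if_neg h7, if_neg h8, if_neg h9, if_neg h10]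
  rfl

theorem pvKey (t1 t2 : String) : is_related_task_type_py t1 t2 = is_related_task_type_py_alt t1 t2 := by
  by_cases h0 : t1 = "compile_verilog"
  · subst h0
    by_cases g0 : t2 = "compile_verilog"
    · subst g0; decide
    by_cases g1 : t2 = "compile_code"
    · subst g1; decide
    by_cases g2 : t2 = "test_python"
    · subst g2; decide
    by_cases g3 : t2 = "run_python"
    · subst g3; decide
    by_cases g4 : t2 = "python_task"
    · subst g4; decide
    by_cases g5 : t2 = "debug_task"
    · subst g5; decide
    by_cases g6 : t2 = "fix_task"
    · subst g6; decide
    by_cases g7 : t2 = "read_task"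
    · subst g7; decide
    by_cases g8 : t2 = "analyze_task"
    · subst g8; decide
    by_cases g9 : t2 = "write_code"
    · subst g9; decide
    by_cases g10 : t2 = "write_task"
    · subst g10; decide
    simp_all [is_related_task_type_py, is_related_task_type_py_alt, pvLoopA, pvGroups, pvGval, pvGAux]
  by_cases h1 : t1 = "compile_code"
  · subst h1
    by_cases g0 : t2 = "compile_verilog"
    · subst g0; decide
    by_cases g1 : t2 = "compile_code"
    · subst g1; decide
    by_cases g2 : t2 = "test_python"
    · subst g2; decide
    by_cases g3 : t2 = "run_python"
    · subst g3; decide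
    by_cases g4 : t2 = "python_task"
    · subst g4; decide
    by_cases g5 : t2 = "debug_task"
    · subst g5; decide
    by_cases g6 : t2 = "fix_task"
    · subst g6; decide
    by_cases g7 : t2 = "read_task"
    · subst g7; decide
    by_cases g8 : t2 = "analyze_task"
    · subst g8; decide
    by_cases g9 : t2 = "write_code"
    · subst g9; decide
    by_cases g10 : t2 = "write_task"
    · subst g10; decide
    simp_all [is_related_task_type_py, is_related_task_type_py_alt, pvLoopA, pvGroups, pvGval, pvGAux]
  by_cases h2 : t1 = "test_python"
  · subst h2
    by_cases g0 : t2 = "compile_verilog"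
    · subst g0; decide
    by_cases g1 : t2 = "compile_code"
    · subst g1; decide
    by_cases g2 : t2 = "test_python"
    · subst g2; decide
    by_cases g3 : t2 = "run_python"
    · subst g3; decide
    by_cases g4 : t2 = "python_task"
    · subst g4; decide
    by_cases g5 : t2 = "debug_task"
    · subst g5; decide
    by_cases g6 : t2 = "fix_task"
    · subst g6; decide
    by_cases g7 : t2 = "read_task"
    · subst g7; decide
    by_cases g8 : t2 = "analyze_task"
    · subst g8; decide
    by_cases g9 : t2 = "write_code"
    · subst g9; decide
    by_cases g10 : t2 = "write_task"
    · subst g10; decide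
    simp_all [is_related_task_type_py, is_related_task_type_py_alt, pvLoopA, pvGroups, pvGval, pvGAux]
  by_cases h3 : t1 = "run_python"
  · subst h3
    by_cases g0 : t2 = "compile_verilog"
    · subst g0; decide
    by_cases g1 : t2 = "compile_code"
    · subst g1; decide
    by_cases g2 : t2 = "test_python"
    · subst g2; decide
    by_cases g3 : t2 = "run_python"
    · subst g3; decide
    by_cases g4 : t2 = "python_task"
    · subst g4; decide
    by_cases g5 : t2 = "debug_task"
    · subst g5; decide
    by_cases g6 : t2 = "fix_task"
    · subst g6; decide
    by_cases g7 : t2 = "read_task"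
    · subst g7; decide
    by_cases g8 : t2 = "analyze_task"
    · subst g8; decide
    by_cases g9 : t2 = "write_code"
    · subst g9; decide
    by_cases g10 : t2 = "write_task"
    · subst g10; decide
    simp_all [is_related_task_type_py, is_related_task_type_py_alt, pvLoopA, pvGroups, pvGval, pvGAux]
  by_cases h4 : t1 = "python_task"
  · subst h4
    by_cases g0 : t2 = "compile_verilog"
    · subst g0; decide
    by_cases g1 : t2 = "compile_code"
    · subst g1; decide
    by_cases g2 : t2 = "test_python"
    · subst g2; decide
    by_cases g3 : t2 = "run_python"
    · subst g3; decide
    by_cases g4 : t2 = "python_task"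
    · subst g4; decide
    by_cases g5 : t2 = "debug_task"
    · subst g5; decide
    by_cases g6 : t2 = "fix_task"
    · subst g6; decide
    by_cases g7 : t2 = "read_task"
    · subst g7; decide
    by_cases g8 : t2 = "analyze_task"
    · subst g8; decide
    by_cases g9 : t2 = "write_code"
    · subst g9; decide
    by_cases g10 : t2 = "write_task"
    · subst g10; decide
    simp_all [is_related_task_type_py, is_related_task_type_py_alt, pvLoopA, pvGroups, pvGval, pvGAux]
  by_cases h5 : t1 = "debug_task"
  · subst h5
    by_cases g0 : t2 = "compile_verilog"
    · subst g0; decide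
    by_cases g1 : t2 = "compile_code"
    · subst g1; decide
    by_cases g2 : t2 = "test_python"
    · subst g2; decide
    by_cases g3 : t2 = "run_python"
    · subst g3; decide
    by_cases g4 : t2 = "python_task"
    · subst g4; decide
    by_cases g5 : t2 = "debug_task"
    · subst g5; decide
    by_cases g6 : t2 = "fix_task"
    · subst g6; decide
    by_cases g7 : t2 = "read_task"
    · subst g7; decide
    by_cases g8 : t2 = "analyze_task"
    · subst g8; decide
    by_cases g9 : t2 = "write_code"
    · subst g9; decide
    by_cases g10 : t2 = "write_task"
    · subst g10; decide
    simp_all [is_related_task_type_py, is_related_task_type_py_alt, pvLoopA, pvGroups, pvGval, pvGAux]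
  by_cases h6 : t1 = "fix_task"
  · subst h6
    by_cases g0 : t2 = "compile_verilog"
    · subst g0; decide
    by_cases g1 : t2 = "compile_code"
    · subst g1; decide
    by_cases g2 : t2 = "test_python"
    · subst g2; decide
    by_cases g3 : t2 = "run_python"
    · subst g3; decide
    by_cases g4 : t2 = "python_task"
    · subst g4; decide
    by_cases g5 : t2 = "debug_task"
    · subst g5; decide
    by_cases g6 : t2 = "fix_task"
    · subst g6; decide
    by_cases g7 : t2 = "read_task"
    · subst g7; decide
    by_cases g8 : t2 = "analyze_task"
    · subst g8; decide
    by_cases g9 : t2 = "write_code"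
    · subst g9; decide
    by_cases g10 : t2 = "write_task"
    · subst g10; decide
    simp_all [is_related_task_type_py, is_related_task_type_py_alt, pvLoopA, pvGroups, pvGval, pvGAux]
  by_cases h7 : t1 = "read_task"
  · subst h7
    by_cases g0 : t2 = "compile_verilog"
    · subst g0; decide
    by_cases g1 : t2 = "compile_code"
    · subst g1; decide
    by_cases g2 : t2 = "test_python"
    · subst g2; decide
    by_cases g3 : t2 = "run_python"
    · subst g3; decide
    by_cases g4 : t2 = "python_task"
    · subst g4; decide
    by_cases g5 : t2 = "debug_task"
    · subst g5; decide
    by_cases g6 : t2 = "fix_task"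
    · subst g6; decide
    by_cases g7 : t2 = "read_task"
    · subst g7; decide
    by_cases g8 : t2 = "analyze_task"
    · subst g8; decide
    by_cases g9 : t2 = "write_code"
    · subst g9; decide
    by_cases g10 : t2 = "write_task"
    · subst g10; decide
    simp_all [is_related_task_type_py, is_related_task_type_py_alt, pvLoopA, pvGroups, pvGval, pvGAux]
  by_cases h8 : t1 = "analyze_task"
  · subst h8
    by_cases g0 : t2 = "compile_verilog"
    · subst g0; decide
    by_cases g1 : t2 = "compile_code"
    · subst g1; decide
    by_cases g2 : t2 = "test_python"
    · subst g2; decide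
    by_cases g3 : t2 = "run_python"
    · subst g3; decide
    by_cases g4 : t2 = "python_task"
    · subst g4; decide
    by_cases g5 : t2 = "debug_task"
    · subst g5; decide
    by_cases g6 : t2 = "fix_task"
    · subst g6; decide
    by_cases g7 : t2 = "read_task"
    · subst g7; decide
    by_cases g8 : t2 = "analyze_task"
    · subst g8; decide
    by_cases g9 : t2 = "write_code"
    · subst g9; decide
    by_cases g10 : t2 = "write_task"
    · subst g10; decide
    simp_all [is_related_task_type_py, is_related_task_type_py_alt, pvLoopA, pvGroups, pvGval, pvGAux]
  by_cases h9 : t1 = "write_code"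
  · subst h9
    by_cases g0 : t2 = "compile_verilog"
    · subst g0; decide
    by_cases g1 : t2 = "compile_code"
    · subst g1; decide
    by_cases g2 : t2 = "test_python"
    · subst g2; decide
    by_cases g3 : t2 = "run_python"
    · subst g3; decide
    by_cases g4 : t2 = "python_task"
    · subst g4; decide
    by_cases g5 : t2 = "debug_task"
    · subst g5; decide
    by_cases g6 : t2 = "fix_task"
    · subst g6; decide
    by_cases g7 : t2 = "read_task"
    · subst g7; decide
    by_cases g8 : t2 = "analyze_task"
    · subst g8; decide
    by_cases g9 : t2 = "write_code"
    · subst g9; decide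
    by_cases g10 : t2 = "write_task"
    · subst g10; decide
    simp_all [is_related_task_type_py, is_related_task_type_py_alt, pvLoopA, pvGroups, pvGval, pvGAux]
  by_cases h10 : t1 = "write_task"
  · subst h10
    by_cases g0 : t2 = "compile_verilog"
    · subst g0; decide
    by_cases g1 : t2 = "compile_code"
    · subst g1; decide
    by_cases g2 : t2 = "test_python"
    · subst g2; decide
    by_cases g3 : t2 = "run_python"
    · subst g3; decide
    by_cases g4 : t2 = "python_task"
    · subst g4; decide
    by_cases g5 : t2 = "debug_task"
    · subst g5; decide
    by_cases g6 : t2 = "fix_task"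
    · subst g6; decide
    by_cases g7 : t2 = "read_task"
    · subst g7; decide
    by_cases g8 : t2 = "analyze_task"
    · subst g8; decide
    by_cases g9 : t2 = "write_code"
    · subst g9; decide
    by_cases g10 : t2 = "write_task"
    · subst g10; decide
    simp_all [is_related_task_type_py, is_related_task_type_py_alt, pvLoopA, pvGroups, pvGval, pvGAux]
  simp_all [is_related_task_type_py, is_related_task_type_py_alt, pvLoopA, pvGroups, pvGval, pvGAux]

-- ===== VERDICT (by name: the statement is the Claim_ definition above) =====
theorem is_related_task_type_py_spec : Claim_equal_is_related_task_type_py := by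
  intro t1 t2 _
  exact pvKey t1 t2
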